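-- pv_equiv track=rewrite | github.com/pypi-data/pypi-mirror-197 | packages/ezQpy/ezQpy-0.0.0.1.tar.gz/ezQpy-0.0.0.1/qasmtoqcis/qasm_to_qcis.py | repeat_count
-- ===== SOURCE A (Python) =====
-- def repeat_count(qcis_list):
--     groups = []
--     for i, val in enumerate(qcis_list):
--         if i == 0:
--             cnt = 1
--             loc = i
--             last_val = val
--         elif val == last_val:
--             cnt += 1
--         else:
--             groups.append((cnt, last_val, loc))
--             cnt = 1
--             loc = i
--             last_val = val
--     repeat_groups = groups.copy()
--     for g in groups:
--         if g[0] == 1: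
--             repeat_groups.remove(g)
--     return repeat_groups
-- ===== SOURCE B (Python) =====
-- def repeat_count(qcis_list):
--     starts = [i for i in range(len(qcis_list)) if i == 0 or qcis_list[i] != qcis_list[i - 1]]
--     return [(e - s, qcis_list[s], s) for s, e in zip(starts, starts[1:]) if e - s != 1]
-- ===== Notes on version B (the rewrite author's own statement) =====
-- stated objective: faster
-- what changed: B computes the list of run-boundary indices first (a filter over range(n) comparing each element with its predecessor) and then builds the output by zipping consecutive boundaries, with no running count/last-value state and no second copy-and-remove pass; A keeps a cnt/loc/last_val accumulator and then deletes singleton groups with list.remove, a linear scan per singleton.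
import Mathlib
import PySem

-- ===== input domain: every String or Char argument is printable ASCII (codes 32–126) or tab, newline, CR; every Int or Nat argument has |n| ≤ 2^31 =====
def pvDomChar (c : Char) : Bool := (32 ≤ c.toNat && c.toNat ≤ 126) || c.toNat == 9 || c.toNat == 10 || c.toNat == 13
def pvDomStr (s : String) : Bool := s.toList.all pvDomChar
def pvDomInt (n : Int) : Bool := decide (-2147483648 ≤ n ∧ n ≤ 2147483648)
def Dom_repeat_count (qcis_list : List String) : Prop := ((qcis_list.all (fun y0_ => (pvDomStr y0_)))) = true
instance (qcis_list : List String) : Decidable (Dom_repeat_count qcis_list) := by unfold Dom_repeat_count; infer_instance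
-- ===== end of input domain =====

-- B first computes the run-boundary indices (a filter over range(n)) and then builds the output by
-- zipping consecutive boundaries, instead of A's stateful grouping loop followed by a second
-- copy-and-remove pass; like A, the final (unterminated) run is never emitted.

-- ===== PORT A =====
-- loop body of A's first (grouping) loop; state = (groups, cnt, loc, last_val), iv = (i, val)
def stepA (st : List (Int × String × Int) × Int × Int × String) (iv : Int × String) :
    List (Int × String × Int) × Int × Int × String :=
  if iv.1 = 0 then (st.1, 1, iv.1, iv.2)
  else if iv.2 = st.2.2.2 then (st.1, st.2.1 + 1, st.2.2.1, st.2.2.2)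
  else (st.1 ++ [(st.2.1, st.2.2.2, st.2.2.1)], 1, iv.1, iv.2)

-- loop body of A's second loop: repeat_groups.remove(g) for the cnt==1 groups
def removeStep (rg : List (Int × String × Int)) (g : Int × String × Int) :
    List (Int × String × Int) :=
  if g.1 = 1 then (PySem.List.remove? rg g).getD rg else rg

def repeat_count (qcis_list : List String) : List (Int × String × Int) :=
  let groups := ((PySem.List.enumerate qcis_list 0).foldl stepA ([], 1, 0, "")).1
  groups.foldl removeStep groups

-- ===== PORT B =====
-- the comprehension filter for starts: i == 0 or qcis_list[i] != qcis_list[i-1];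
-- the pyGetD default "" is never read (i ranges over [0,n), and i-1 is only compared when i ≥ 1,
-- Python's `or` short-circuiting at i == 0)
def startPred (qcis_list : List String) (i : Int) : Bool :=
  decide (i = 0) ||
    decide (PySem.List.pyGetD qcis_list i "" ≠ PySem.List.pyGetD qcis_list (i - 1) "")

def repeat_count_alt (qcis_list : List String) : List (Int × String × Int) :=
  let starts := (PySem.List.pyRange 0 (qcis_list.length : Int) 1).filter (startPred qcis_list)
  (starts.zip (PySem.List.slice starts (some 1) none)).filterMap
    (fun se => if se.2 - se.1 ≠ 1 then
        some (se.2 - se.1, PySem.List.pyGetD qcis_list se.1 "", se.1) else none)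

-- ===== PRECONDITION & SPEC =====
def Spec_repeat_count (qcis_list : List String) (out : List (Int × String × Int)) : Prop :=
  out = repeat_count_alt qcis_list
instance (qcis_list : List String) (out : List (Int × String × Int)) :
    Decidable (Spec_repeat_count qcis_list out) := by unfold Spec_repeat_count; infer_instance

-- ===== CLAIM (what is proved, stated in full; the proofs are below) =====
def Claim_equal_repeat_count : Prop := ∀ (qcis_list : List String), Dom_repeat_count qcis_list → Spec_repeat_count qcis_list (repeat_count qcis_list)

-- ===== LEMMAS AND PROOFS =====

-- the run decomposition both programs compute: current run has count c, value lv, start loc l,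
-- and ys is the rest of the input beginning at index k
def contChunks (c : Int) (lv : String) (l k : Int) : List String → List (Int × String × Int)
  | [] => [(c, lv, l)]
  | v :: rest =>
      if v = lv then contChunks (c + 1) lv l (k + 1) rest
      else (c, lv, l) :: contChunks 1 v k (k + 1) rest

def runsOf : List String → List (Int × String × Int)
  | [] => []
  | v :: rest => contChunks 1 v 0 1 rest

lemma contChunks_ne_nil (c : Int) (lv : String) (l k : Int) (ys : List String) :
    contChunks c lv l k ys ≠ [] := by
  induction ys generalizing c lv l k with
  | nil => simp [contChunks]
  | cons v rest ih =>
      simp only [contChunks]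
      split_ifs
      · exact ih _ _ _ _
      · simp

lemma contChunks_head (c : Int) (lv : String) (l k : Int) (ys : List String) :
    ∃ c' t, contChunks c lv l k ys = (c', lv, l) :: t := by
  induction ys generalizing c lv l k with
  | nil => exact ⟨c, [], rfl⟩
  | cons v rest ih =>
      simp only [contChunks]
      split_ifs with hv
      · exact ih _ _ _ _
      · exact ⟨c, _, rfl⟩

lemma contChunks_loc_mem (c : Int) (lv : String) (l k : Int) (ys : List String) :
    ∀ g ∈ contChunks c lv l k ys, g.2.2 = l ∨ k ≤ g.2.2 := by
  induction ys generalizing c lv l k with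
  | nil => simp [contChunks]
  | cons v rest ih =>
      simp only [contChunks]
      split_ifs with hv
      · exact fun g hg => (ih _ _ _ _ g hg).imp id (by omega)
      · intro g hg
        rcases List.mem_cons.mp hg with h | h
        · left; simp [h]
        · right
          rcases ih 1 v k (k + 1) g h with h' | h' <;> omega

lemma contChunks_loc_pairwise (c : Int) (lv : String) (l k : Int) (ys : List String) (hlk : l < k) :
    (contChunks c lv l k ys).Pairwise (fun a b => a.2.2 < b.2.2) := by
  induction ys generalizing c lv l k with
  | nil => simp [contChunks]
  | cons v rest ih =>
      simp only [contChunks]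
      split_ifs with hv
      · exact ih _ _ _ _ (by omega)
      · refine List.Pairwise.cons ?_ (ih 1 v k (k + 1) (by omega))
        intro g hg
        rcases contChunks_loc_mem 1 v k (k + 1) rest g hg with h | h <;> simp <;> omega

lemma contChunks_nodup (c : Int) (lv : String) (l k : Int) (ys : List String) (hlk : l < k) :
    (contChunks c lv l k ys).Nodup := by
  refine (contChunks_loc_pairwise c lv l k ys hlk).imp ?_
  intro a b hab heq
  rw [heq] at hab
  omega

-- A's grouping loop on the suffix beginning at index k ≥ 1 (so the i==0 branch never fires)
lemma foldA (ys : List String) (k : Int) (g : List (Int × String × Int)) (c l : Int)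
    (lv : String) (hk : 1 ≤ k) :
    ((PySem.List.enumerate ys k).foldl stepA (g, c, l, lv)).1
      = g ++ (contChunks c lv l k ys).dropLast := by
  induction ys generalizing k g c l lv with
  | nil => simp [contChunks]
  | cons v rest ih =>
      rw [PySem.List.enumerate_cons]
      simp only [List.foldl_cons]
      have hk0 : ¬ (k = 0) := by omega
      by_cases hv : v = lv
      · rw [show stepA (g, c, l, lv) (k, v) = (g, c + 1, l, lv) from by
            simp [stepA, hk0, hv]]
        rw [ih (k + 1) g (c + 1) l lv (by omega)]
        simp [contChunks, hv]
      · rw [show stepA (g, c, l, lv) (k, v) = (g ++ [(c, lv, l)], 1, k, v) from by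
            simp [stepA, hk0, hv]]
        rw [ih (k + 1) (g ++ [(c, lv, l)]) 1 k v (by omega)]
        obtain ⟨b, t, hbt⟩ := List.exists_cons_of_ne_nil (contChunks_ne_nil 1 v k (k + 1) rest)
        simp [contChunks, hv, hbt]

-- A's remove loop: with distinct groups it is exactly a filter keeping cnt ≠ 1
lemma remove?_append_cons (kept rest : List (Int × String × Int)) (g : Int × String × Int)
    (hg : g ∉ kept) :
    PySem.List.remove? (kept ++ g :: rest) g = some (kept ++ rest) := by
  induction kept with
  | nil => simp
  | cons x xs ih =>
      have hx : x ≠ g := fun h => hg (by simp [h])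
      rw [List.cons_append, PySem.List.remove?_cons_of_ne _ hx,
        ih (fun h => hg (List.mem_cons_of_mem _ h))]
      rfl

lemma removeLoop (todo kept : List (Int × String × Int)) (h : (kept ++ todo).Nodup) :
    todo.foldl removeStep (kept ++ todo) = kept ++ todo.filter (fun g => decide (g.1 ≠ 1)) := by
  induction todo generalizing kept with
  | nil => simp
  | cons g rest ih =>
      simp only [List.foldl_cons]
      by_cases h1 : g.1 = 1
      · have hg : g ∉ kept := by
          rw [List.nodup_append] at h
          exact fun hm => (h.2.2 g hm g (by simp)) rfl
        rw [show removeStep (kept ++ g :: rest) g = kept ++ rest from by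
            simp [removeStep, h1, remove?_append_cons kept rest g hg]]
        rw [ih kept (((List.sublist_cons_self g rest).append_left kept).nodup h)]
        simp [h1]
      · rw [show removeStep (kept ++ g :: rest) g = kept ++ g :: rest from by
            simp [removeStep, h1]]
        rw [show kept ++ g :: rest = (kept ++ [g]) ++ rest from by simp]
        rw [ih (kept ++ [g]) (by simpa using h)]
        simp [h1]

lemma A_eq (xs : List String) :
    repeat_count xs = ((runsOf xs).dropLast).filter (fun g => decide (g.1 ≠ 1)) := by
  cases xs with
  | nil => rfl
  | cons v rest =>
      unfold repeat_count
      rw [PySem.List.enumerate_cons]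
      simp only [List.foldl_cons]
      rw [show stepA ([], 1, 0, "") (0, v) = ([], 1, 0, v) from by simp [stepA]]
      simp only [zero_add]
      rw [foldA rest 1 [] 1 0 v le_rfl]
      simp only [List.nil_append]
      have hnd : ((contChunks 1 v 0 1 rest).dropLast).Nodup :=
        (List.dropLast_sublist _).nodup (contChunks_nodup 1 v 0 1 rest (by omega))
      have := removeLoop ((contChunks 1 v 0 1 rest).dropLast) [] (by simpa using hnd)
      simpa [runsOf] using this

-- B, part 1: the boundary indices in [k, n) are exactly the start locations of the runs after
-- the current one (the current run, of value lv = xs[k-1], started earlier)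
lemma starts_suffix (xs : List String) (ys : List String) (k : Nat) (c l : Int) (lv : String)
    (hdrop : xs.drop k = ys) (hk1 : 1 ≤ k)
    (hlv : PySem.List.pyGetD xs ((k : Int) - 1) "" = lv) :
    (PySem.List.pyRange (k : Int) (xs.length : Int) 1).filter (startPred xs)
      = ((contChunks c lv l (k : Int) ys).map (fun g => g.2.2)).tail := by
  induction ys generalizing k c l lv with
  | nil =>
      have hk : xs.length <= k := List.drop_eq_nil_iff.mp hdrop
      rw [PySem.List.pyRange_one_eq_nil (by exact_mod_cast hk)]
      simp [contChunks]
  | cons v rest ih =>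
      have hlt : k < xs.length := by
        rcases Nat.lt_or_ge k xs.length with h | h
        · exact h
        · rw [List.drop_eq_nil_iff.mpr h] at hdrop; simp at hdrop
      have hget : xs[k] = v := by
        rw [List.drop_eq_getElem_cons hlt] at hdrop
        exact (List.cons.injEq .. ▸ hdrop).1
      have hdrop' : xs.drop (k + 1) = rest := by
        rw [List.drop_eq_getElem_cons hlt] at hdrop
        exact (List.cons.injEq .. ▸ hdrop).2
      have hgetD : PySem.List.pyGetD xs (k : Int) "" = v := by
        rw [PySem.List.pyGetD_natCast]
        simp [List.getD, hlt, hget]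
      have hlv' : PySem.List.pyGetD xs (((k + 1 : Nat) : Int) - 1) "" = v := by
        push_cast
        rw [show ((k : Int) + 1 - 1) = (k : Int) from by ring]
        exact hgetD
      have hk0 : ¬ (k = 0) := by omega
      rw [PySem.List.pyRange_one_cons (by exact_mod_cast hlt), List.filter_cons]
      by_cases hv : v = lv
      · have hpredf : startPred xs (k : Int) = false := by
          simp [startPred, hk0, hgetD, hlv, hv]
        have hrec := ih (k + 1) (c + 1) l lv hdrop' (by omega) (hv ▸ hlv')
        push_cast at hrec
        rw [hpredf]
        simp only [Bool.false_eq_true, if_false]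
        rw [show contChunks c lv l (k : Int) (v :: rest)
            = contChunks (c + 1) lv l ((k : Int) + 1) rest from by simp [contChunks, hv]]
        exact hrec
      · have hpredt : startPred xs (k : Int) = true := by
          simp [startPred, hgetD, hlv, hv]
        have hrec := ih (k + 1) 1 (k : Int) v hdrop' (by omega) hlv'
        push_cast at hrec
        rw [hpredt]
        simp only [if_true]
        rw [show contChunks c lv l (k : Int) (v :: rest)
            = (c, lv, l) :: contChunks 1 v (k : Int) ((k : Int) + 1) rest from by
              simp [contChunks, hv]]
        rw [List.map_cons, List.tail_cons, hrec]
        obtain ⟨c', t, hbt⟩ := contChunks_head 1 v (k : Int) ((k : Int) + 1) rest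
        rw [hbt]
        simp

-- B, part 2: consecutive runs satisfy loc' = loc + cnt, and each run's value is xs[loc]
lemma contChunks_chain (xs : List String) (ys : List String) (k : Nat) (c l : Int) (lv : String)
    (hdrop : xs.drop k = ys) (hlc : l + c = (k : Int))
    (hlv : PySem.List.pyGetD xs l "" = lv) :
    List.IsChain (fun a b => b.2.2 = a.2.2 + a.1) (contChunks c lv l (k : Int) ys)
      ∧ ∀ g ∈ contChunks c lv l (k : Int) ys, PySem.List.pyGetD xs g.2.2 "" = g.2.1 := by
  induction ys generalizing k c l lv with
  | nil =>
      constructor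
      · exact List.isChain_singleton _
      · intro g hg
        simp [contChunks] at hg
        simp [hg, hlv]
  | cons v rest ih =>
      have hlt : k < xs.length := by
        rcases Nat.lt_or_ge k xs.length with h | h
        · exact h
        · rw [List.drop_eq_nil_iff.mpr h] at hdrop; simp at hdrop
      have hget : xs[k] = v := by
        rw [List.drop_eq_getElem_cons hlt] at hdrop
        exact (List.cons.injEq .. ▸ hdrop).1
      have hdrop' : xs.drop (k + 1) = rest := by
        rw [List.drop_eq_getElem_cons hlt] at hdrop
        exact (List.cons.injEq .. ▸ hdrop).2
      have hgetD : PySem.List.pyGetD xs (k : Int) "" = v := by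
        rw [PySem.List.pyGetD_natCast]
        simp [List.getD, hlt, hget]
      simp only [contChunks]
      by_cases hv : v = lv
      · simp only [hv, if_true]
        have hrec := ih (k + 1) (c + 1) l lv hdrop' (by push_cast; omega) hlv
        push_cast at hrec
        exact hrec
      · simp only [hv, if_false]
        have hrec := ih (k + 1) 1 (k : Int) v hdrop' (by push_cast; omega) hgetD
        push_cast at hrec
        obtain ⟨c', t, hbt⟩ := contChunks_head 1 v (k : Int) ((k : Int) + 1) rest
        constructor
        · rw [hbt] at hrec ⊢
          exact List.isChain_cons_cons.mpr ⟨by simp; omega, hrec.1⟩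
        · intro g hg
          rcases List.mem_cons.mp hg with h | h
          · simp [h, hlv]
          · exact hrec.2 g h

-- B, part 3: zipping consecutive run-start locations rebuilds dropLast + the cnt ≠ 1 filter
lemma zip_build (xs : List String) (rs : List (Int × String × Int))
    (hchain : List.IsChain (fun a b => b.2.2 = a.2.2 + a.1) rs)
    (hval : ∀ g ∈ rs, PySem.List.pyGetD xs g.2.2 "" = g.2.1) :
    ((rs.map (fun g => g.2.2)).zip ((rs.map (fun g => g.2.2)).drop 1)).filterMap
      (fun se => if se.2 - se.1 ≠ 1 then
          some (se.2 - se.1, PySem.List.pyGetD xs se.1 "", se.1) else none)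
      = rs.dropLast.filter (fun g => decide (g.1 ≠ 1)) := by
  induction rs with
  | nil => rfl
  | cons a t ih =>
      cases t with
      | nil => rfl
      | cons b t' =>
          have hab : b.2.2 = a.2.2 + a.1 := (List.isChain_cons_cons.mp hchain).1
          have hchain' := (List.isChain_cons_cons.mp hchain).2
          have hval' : ∀ g ∈ b :: t', PySem.List.pyGetD xs g.2.2 "" = g.2.1 :=
            fun g hg => hval g (List.mem_cons_of_mem _ hg)
          have ihh := ih hchain' hval'
          have hav : PySem.List.pyGetD xs a.2.2 "" = a.2.1 := hval a (by simp)
          have hd : b.2.2 - a.2.2 = a.1 := by omega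
          simp only [List.map_cons, List.drop_one, List.tail_cons, ne_eq, ite_not] at ihh
          by_cases h1 : a.1 = 1
          · simp [hd, h1, ihh]
          · simp [hd, hav, h1, ihh]

lemma B_eq (xs : List String) :
    repeat_count_alt xs = ((runsOf xs).dropLast).filter (fun g => decide (g.1 ≠ 1)) := by
  cases xs with
  | nil => rfl
  | cons v rest =>
      have hlv : PySem.List.pyGetD (v :: rest) (((1 : Nat) : Int) - 1) "" = v := by
        rw [show (((1 : Nat) : Int) - 1) = 0 from by norm_num, PySem.List.pyGetD_zero_cons]
      have hs := starts_suffix (v :: rest) rest 1 1 0 v (by simp) le_rfl hlv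
      obtain ⟨c', t, hbt⟩ := contChunks_head 1 v 0 1 rest
      have h0len : (0 : Int) < (((v :: rest).length : Nat) : Int) := by
        have h : (0 : Nat) < (v :: rest).length := by simp
        exact_mod_cast h
      have hstarts : (PySem.List.pyRange 0 (((v :: rest).length : Nat) : Int) 1).filter
            (startPred (v :: rest))
          = (contChunks 1 v 0 1 rest).map (fun g => g.2.2) := by
        rw [PySem.List.pyRange_one_cons h0len, List.filter_cons,
          show ((0 : Int) + 1) = ((1 : Nat) : Int) from by norm_num, hs]
        push_cast
        rw [hbt]
        simp [startPred]
      have hlv0 : PySem.List.pyGetD (v :: rest) (0 : Int) "" = v := by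
        rw [PySem.List.pyGetD_zero_cons]
      have hch := contChunks_chain (v :: rest) rest 1 1 0 v (by simp) (by simp) hlv0
      push_cast at hch
      have hzip := zip_build (v :: rest) (contChunks 1 v 0 1 rest) hch.1 hch.2
      have hsl : PySem.List.slice ((contChunks 1 v 0 1 rest).map (fun g => g.2.2)) (some 1) none
          = ((contChunks 1 v 0 1 rest).map (fun g => g.2.2)).drop 1 := by
        simp [PySem.List.slice_from]
      simp only [repeat_count_alt]
      rw [hstarts, hsl, hzip]
      rfl

-- ===== VERDICT (by name: the statement is the Claim_ definition above) =====
theorem repeat_count_spec : Claim_equal_repeat_count := by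
  intro xs _
  show repeat_count xs = repeat_count_alt xs
  rw [A_eq, B_eq]
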